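-- pv_equiv track=rewrite | github.com/MacroMayhem/DocumentUnderstanding | data/data_constructor.py | flipkart_category_break
-- ===== SOURCE A (Python) =====
-- def flipkart_category_break(unique_categories,category_tree):
--
--     categories =  category_tree.split('>>')
--     for category in categories:
--         lower_category = category.lower()
--         processed_category = ""
--         for char in lower_category:
--             if char.isalnum():
--                 processed_category += char
--             elif char == ' ' and len(processed_category) > 0:
--                 unique_categories.add(processed_category)
--                 processed_category = ""
--
--         if len(processed_category) > 0:
--             unique_categories.add(processed_category)
--
--     return unique_categories
-- ===== SOURCE B (Python) =====
-- def flipkart_category_break(unique_categories, category_tree):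
--     for segment in category_tree.split('>>'):
--         for token in segment.lower().split(' '):
--             cleaned = ''.join(c for c in token if c.isalnum())
--             if len(cleaned) > 0:
--                 unique_categories.add(cleaned)
--     return unique_categories
-- ===== Notes on version B (the rewrite author's own statement) =====
-- stated objective: simpler
-- what changed: Replaces A's char-by-char accumulator/flush state machine with splitting each '>>' segment on ' ' and per-word filtering of alphanumeric characters.
import Mathlib
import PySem

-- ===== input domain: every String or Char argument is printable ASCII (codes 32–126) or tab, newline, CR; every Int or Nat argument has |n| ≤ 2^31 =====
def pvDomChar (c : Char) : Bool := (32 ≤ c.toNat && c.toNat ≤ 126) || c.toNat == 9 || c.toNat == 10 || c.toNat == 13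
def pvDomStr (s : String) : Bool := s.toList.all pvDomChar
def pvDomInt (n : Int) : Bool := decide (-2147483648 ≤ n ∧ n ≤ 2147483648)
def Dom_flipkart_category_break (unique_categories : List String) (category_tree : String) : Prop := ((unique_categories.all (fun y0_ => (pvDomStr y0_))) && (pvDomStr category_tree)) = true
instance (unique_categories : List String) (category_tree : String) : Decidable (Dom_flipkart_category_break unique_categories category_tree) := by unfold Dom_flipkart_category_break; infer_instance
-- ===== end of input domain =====

-- B replaces A's manual char-by-char accumulate/flush state machine by split-on-space
-- plus per-word filtering (objective: simpler). Both A and B mutate the argument set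
-- identically in Python; the theorems are about the returned set (as a list of distinct elements).

-- ===== PORT A =====
-- inner-loop body of A, named for reuse in the proofs (same branches, same order)
def pvStepA (st : List String × List Char) (ch : Char) : List String × List Char :=
  if PySem.Chars.isalnum ch then (st.1, st.2 ++ [ch])
  else if ch = ' ' ∧ st.2.length > 0 then (PySem.Set.add st.1 (String.ofList st.2), [])
  else st

def flipkart_category_break (unique_categories : List String) (category_tree : String) : List String :=
  let categories := PySem.Chars.splitOn category_tree.toList ">>".toList
  categories.foldl
    (fun uc category =>
      let lower_category := PySem.Chars.lower category
      let st := lower_category.foldl pvStepA (uc, [])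
      if st.2.length > 0 then PySem.Set.add st.1 (String.ofList st.2) else st.1)
    unique_categories

-- ===== PORT B =====
-- per-token body of B, named for reuse in the proofs
def pvAddTok (uc : List String) (token : List Char) : List String :=
  let cleaned := token.filter PySem.Chars.isalnum
  if cleaned.length > 0 then PySem.Set.add uc (String.ofList cleaned) else uc

def flipkart_category_break_alt (unique_categories : List String) (category_tree : String) : List String :=
  (PySem.Chars.splitOn category_tree.toList ">>".toList).foldl
    (fun uc segment =>
      (PySem.Chars.splitOn (PySem.Chars.lower segment) " ".toList).foldl pvAddTok uc)
    unique_categories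

-- ===== PRECONDITION & SPEC =====
def Spec_flipkart_category_break (unique_categories : List String) (category_tree : String) (out : List String) : Prop := out = flipkart_category_break_alt unique_categories category_tree
instance (unique_categories : List String) (category_tree : String) (out : List String) : Decidable (Spec_flipkart_category_break unique_categories category_tree out) := by unfold Spec_flipkart_category_break; infer_instance

-- ===== CLAIM (what is proved, stated in full; the proofs are below) =====
def Claim_equal_flipkart_category_break : Prop := ∀ (unique_categories : List String) (category_tree : String), Dom_flipkart_category_break unique_categories category_tree → Spec_flipkart_category_break unique_categories category_tree (flipkart_category_break unique_categories category_tree)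

-- ===== LEMMAS AND PROOFS =====

-- structural recursion computing split-on-one-space as (first token, remaining tokens)
def pvMsp : List Char → List Char × List (List Char)
  | [] => ([], [])
  | c :: cs =>
    if c = ' ' then ([], (pvMsp cs).1 :: (pvMsp cs).2)
    else (c :: (pvMsp cs).1, (pvMsp cs).2)

lemma pv_go_space (cs : List Char) : ∀ (fuel : Nat), cs.length ≤ fuel → ∀ (cur : List Char) (acc : List (List Char)),
    PySem.Chars.splitOn.go [' '] (fuel + 1) cs cur acc
      = acc.reverse ++ (cur.reverse ++ (pvMsp cs).1) :: (pvMsp cs).2 := by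
  induction cs with
  | nil =>
    intro fuel _ cur acc
    simp [PySem.Chars.splitOn.go, pvMsp]
  | cons c rest ih =>
    intro fuel hf cur acc
    obtain ⟨g, rfl⟩ : ∃ g, fuel = g + 1 := ⟨fuel - 1, by simp at hf; omega⟩
    rw [show g + 1 + 1 = (g+1) + 1 from rfl]
    by_cases hc : c = ' '
    · subst hc
      have hpre : [' '].isPrefixOf (' ' :: rest) = true := by simp [List.isPrefixOf]
      simp only [PySem.Chars.splitOn.go, hpre, if_pos,
        show List.drop [' '].length (' ' :: rest) = rest from rfl]
      rw [ih g (by simp at hf; omega) [] (cur.reverse :: acc)]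
      simp [pvMsp]
    · have hpre : [' '].isPrefixOf (c :: rest) = false := by
        simp only [List.isPrefixOf, Bool.and_eq_false_iff, beq_eq_false_iff_ne]
        exact Or.inl (Ne.symm hc)
      simp only [PySem.Chars.splitOn.go, hpre, Bool.false_eq_true, if_false]
      rw [ih g (by simp at hf; omega) (c :: cur) acc]
      simp [pvMsp, hc]

lemma pv_splitOn_space (cs : List Char) :
    PySem.Chars.splitOn cs [' '] = (pvMsp cs).1 :: (pvMsp cs).2 := by
  unfold PySem.Chars.splitOn
  rw [pv_go_space cs cs.length (le_refl _) [] []]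
  simp

-- helper: "add if nonempty"
def pvAddNE (uc : List String) (w : List Char) : List String :=
  if w.length > 0 then PySem.Set.add uc (String.ofList w) else uc

lemma pvAddTok_eq (uc : List String) (t : List Char) :
    pvAddTok uc t = pvAddNE uc (t.filter PySem.Chars.isalnum) := rfl

-- the core invariant: A's accumulate/flush loop over cs, started with pending word acc,
-- equals B's fold over the space-split tokens of cs with acc prefixed to the first token
lemma pv_seg (cs : List Char) : ∀ (uc : List String) (acc : List Char),
    (let st := cs.foldl pvStepA (uc, acc);
     if st.2.length > 0 then PySem.Set.add st.1 (String.ofList st.2) else st.1)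
      = (pvMsp cs).2.foldl pvAddTok
          (pvAddNE uc (acc ++ ((pvMsp cs).1.filter PySem.Chars.isalnum))) := by
  induction cs with
  | nil =>
    intro uc acc
    simp [pvMsp, pvAddNE]
  | cons c rest ih =>
    intro uc acc
    by_cases ha : PySem.Chars.isalnum c = true
    · have hc : ¬ c = ' ' := by
        rintro rfl; exact absurd ha (by decide)
      simp only [List.foldl_cons, pvStepA, ha, if_pos]
      rw [ih uc (acc ++ [c])]
      simp [pvMsp, hc, ha]
    · simp only [List.foldl_cons]
      by_cases hc : c = ' '
      · subst hc
        have hstep : pvStepA (uc, acc) ' ' = (pvAddNE uc acc, []) := by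
          by_cases hl : acc.length > 0
          · simp [pvStepA, pvAddNE, ha, hl]
          · have hnil : acc = [] := List.eq_nil_of_length_eq_zero (by omega)
            subst hnil; simp [pvStepA, pvAddNE, ha]
        rw [hstep, ih (pvAddNE uc acc) []]
        simp [pvMsp, pvAddTok_eq, pvAddNE]
      · have hstep : pvStepA (uc, acc) c = (uc, acc) := by
          simp [pvStepA, ha, hc]
        rw [hstep, ih uc acc]
        simp [pvMsp, hc, ha]

-- per-segment: A's inner loop + final flush equals B's inner fold over split(' ')
lemma pv_seg_main (uc : List String) (seg : List Char) :
    (let st := (PySem.Chars.lower seg).foldl pvStepA (uc, []);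
     if st.2.length > 0 then PySem.Set.add st.1 (String.ofList st.2) else st.1)
      = (PySem.Chars.splitOn (PySem.Chars.lower seg) " ".toList).foldl pvAddTok uc := by
  have hsp : (" ".toList : List Char) = [' '] := rfl
  rw [hsp, pv_splitOn_space, List.foldl_cons, pv_seg (PySem.Chars.lower seg) uc [],
    pvAddTok_eq]
  simp

-- ===== VERDICT (by name: the statement is the Claim_ definition above) =====
theorem flipkart_category_break_spec : Claim_equal_flipkart_category_break := by
  intro uc ct _
  unfold Spec_flipkart_category_break flipkart_category_break flipkart_category_break_alt
  simp only []
  congr 1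
  funext s seg
  exact pv_seg_main s seg
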